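-- pv_equiv track=rewrite | github.com/mudassirkhan-17/Ocr | policy_additional_interests.py | _expand_neighbors
-- ===== SOURCE A (Python) =====
-- from typing import Dict, List, Optional, Tuple
--
-- def _expand_neighbors(page_nums: List[int], radius: int) -> List[int]:
--     if radius <= 0:
--         return sorted(set(page_nums))
--     s = set(page_nums)
--     for n in list(s):
--         for i in range(1, radius + 1):
--             s.add(n - i)
--             s.add(n + i)
--     return sorted(x for x in s if x >= 0)
-- ===== SOURCE B (Python) =====
-- from typing import List
--
-- def _expand_neighbors(page_nums: List[int], radius: int) -> List[int]:
--     if radius <= 0: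
--         return sorted(set(page_nums))
--     out: List[int] = []
--     cur = None  # current merged interval (lo, hi), or None
--     for p in sorted(set(page_nums)):
--         lo, hi = p - radius, p + radius
--         if cur is None:
--             cur = (lo, hi)
--         elif lo <= cur[1] + 1:
--             cur = (cur[0], hi)
--         else:
--             out.extend(range(max(0, cur[0]), cur[1] + 1))
--             cur = (lo, hi)
--     if cur is not None:
--         out.extend(range(max(0, cur[0]), cur[1] + 1))
--     return out
-- ===== Notes on version B (the rewrite author's own statement) =====
-- stated objective: faster
-- what changed: Instead of inserting every neighbor of every page into a set and sorting the whole expanded set, B sorts the distinct pages once, merges overlapping/adjacent [p-radius, p+radius] intervals in one left-to-right scan, and emits the merged ranges directly in ascending order (no big set, no final sort).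
import Mathlib
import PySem

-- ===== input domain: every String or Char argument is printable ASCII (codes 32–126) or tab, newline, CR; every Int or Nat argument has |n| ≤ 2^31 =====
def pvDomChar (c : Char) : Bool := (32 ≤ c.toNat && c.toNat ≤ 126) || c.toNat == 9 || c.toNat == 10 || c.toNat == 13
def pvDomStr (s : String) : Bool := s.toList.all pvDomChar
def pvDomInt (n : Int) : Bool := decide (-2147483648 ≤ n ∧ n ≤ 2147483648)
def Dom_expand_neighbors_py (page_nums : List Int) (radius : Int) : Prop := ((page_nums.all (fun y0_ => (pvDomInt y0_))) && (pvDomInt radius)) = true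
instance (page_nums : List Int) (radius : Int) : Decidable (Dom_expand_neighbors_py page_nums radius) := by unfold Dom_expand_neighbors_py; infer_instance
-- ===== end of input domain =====

-- B merges sorted [p-radius, p+radius] intervals and emits the merged ranges in order,
-- instead of materialising every neighbor in a set and sorting it (objective: faster scan, no big sort).

-- ===== PORT A =====
def expand_neighbors_py (page_nums : List Int) (radius : Int) : List Int :=
  if radius ≤ 0 then
    PySem.List.sorted (PySem.Set.ofList page_nums) (fun x => x) false
  else
    let s0 : PySem.Set Int := PySem.Set.ofList page_nums
    -- 'for n in list(s)' iterates a snapshot of the original set; the result is a set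
    -- then sorted, so it does not depend on the (unmodelled) hash iteration order.
    let s : PySem.Set Int := s0.foldl (fun s n =>
      (PySem.List.pyRange 1 (radius + 1) 1).foldl (fun s i =>
        PySem.Set.add (PySem.Set.add s (n - i)) (n + i)) s) s0
    PySem.List.sorted (s.filter (fun x => decide (0 ≤ x))) (fun x => x) false

-- ===== PORT B =====
-- out.extend(range(max(0, lo), hi + 1))
def pvEmit (lo hi : Int) : List Int := PySem.List.pyRange (max 0 lo) (hi + 1) 1

-- one iteration of B's merge loop; state = (out, cur)
def pvStep (radius : Int) (st : List Int × Option (Int × Int)) (p : Int) : List Int × Option (Int × Int) :=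
  match st.2 with
  | none => (st.1, some (p - radius, p + radius))
  | some (lo, hi) =>
    if p - radius ≤ hi + 1 then (st.1, some (lo, p + radius))
    else (st.1 ++ pvEmit lo hi, some (p - radius, p + radius))

-- the trailing 'if cur is not None: out.extend(...)'
def pvFin (st : List Int × Option (Int × Int)) : List Int :=
  match st.2 with
  | none => st.1
  | some (lo, hi) => st.1 ++ pvEmit lo hi

def expand_neighbors_py_alt (page_nums : List Int) (radius : Int) : List Int :=
  if radius ≤ 0 then
    PySem.List.sorted (PySem.Set.ofList page_nums) (fun x => x) false
  else
    pvFin ((PySem.List.sorted (PySem.Set.ofList page_nums) (fun x => x) false).foldl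
      (pvStep radius) ([], none))

-- ===== PRECONDITION & SPEC =====
def Spec_expand_neighbors_py (page_nums : List Int) (radius : Int) (out : List Int) : Prop := out = expand_neighbors_py_alt page_nums radius
instance (page_nums : List Int) (radius : Int) (out : List Int) : Decidable (Spec_expand_neighbors_py page_nums radius out) := by unfold Spec_expand_neighbors_py; infer_instance

-- ===== CLAIM (what is proved, stated in full; the proofs are below) =====
def Claim_equal_expand_neighbors_py : Prop := ∀ (page_nums : List Int) (radius : Int), Dom_expand_neighbors_py page_nums radius → Spec_expand_neighbors_py page_nums radius (expand_neighbors_py page_nums radius)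

-- ===== LEMMAS AND PROOFS =====

-- the rest of B's merge loop, as a recursion on the remaining sorted pages
def pvF (radius : Int) : List Int → Int → Int → List Int
  | [], lo, hi => pvEmit lo hi
  | p :: rest, lo, hi =>
    if p - radius ≤ hi + 1 then pvF radius rest lo (p + radius)
    else pvEmit lo hi ++ pvF radius rest (p - radius) (p + radius)

theorem pvFoldl_eq_pvF (radius : Int) (u : List Int) : ∀ (out : List Int) (lo hi : Int),
    pvFin (u.foldl (pvStep radius) (out, some (lo, hi))) = out ++ pvF radius u lo hi := by
  induction u with
  | nil => intro out lo hi; simp [pvFin, pvF]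
  | cons p rest ih =>
    intro out lo hi
    simp only [List.foldl_cons, pvStep, pvF]
    by_cases h : p - radius ≤ hi + 1
    · simp [h, ih]
    · simp [h, ih, List.append_assoc]

theorem mem_pvEmit (lo hi x : Int) : x ∈ pvEmit lo hi ↔ 0 ≤ x ∧ lo ≤ x ∧ x ≤ hi := by
  rw [pvEmit, PySem.List.mem_pyRange_one]; omega

theorem pvF_spec (radius : Int) (hr : 0 ≤ radius) (u : List Int) : ∀ (lo hi : Int),
    u.Pairwise (· < ·) → lo ≤ hi → (∀ p ∈ u, hi ≤ p + radius) → (∀ p ∈ u, lo ≤ p - radius) →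
    (∀ x, x ∈ pvF radius u lo hi ↔ 0 ≤ x ∧ (lo ≤ x ∧ x ≤ hi ∨ ∃ p ∈ u, p - radius ≤ x ∧ x ≤ p + radius))
    ∧ (pvF radius u lo hi).Pairwise (· < ·) := by
  induction u with
  | nil =>
    intro lo hi _ _ _ _
    constructor
    · intro x; rw [pvF, mem_pvEmit]; simp
    · simp only [pvF, pvEmit]; exact PySem.List.pairwise_lt_pyRange_one _ _
  | cons p rest ih =>
    intro lo hi hpw hlohi hgrow hlo
    have hpq : ∀ q ∈ rest, p < q := (List.pairwise_cons.mp hpw).1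
    have hpw' : rest.Pairwise (· < ·) := (List.pairwise_cons.mp hpw).2
    have hgp : hi ≤ p + radius := hgrow p (List.mem_cons_self)
    have hlp : lo ≤ p - radius := hlo p (List.mem_cons_self)
    rw [pvF]
    by_cases h : p - radius ≤ hi + 1
    · rw [if_pos h]
      obtain ⟨ihm, ihs⟩ := ih lo (p + radius) hpw' (by omega)
        (fun q hq => by have := hpq q hq; omega)
        (fun q hq => by have := hpq q hq; omega)
      refine ⟨fun x => ?_, ihs⟩
      rw [ihm x]
      constructor
      · rintro ⟨hx, (⟨h1, h2⟩ | ⟨q, hq, hqx⟩)⟩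
        · by_cases hhi : x ≤ hi
          · exact ⟨hx, Or.inl ⟨h1, hhi⟩⟩
          · exact ⟨hx, Or.inr ⟨p, List.mem_cons_self, by omega⟩⟩
        · exact ⟨hx, Or.inr ⟨q, List.mem_cons_of_mem _ hq, hqx⟩⟩
      · rintro ⟨hx, (⟨h1, h2⟩ | ⟨q, hq, hqx⟩)⟩
        · exact ⟨hx, Or.inl ⟨h1, by omega⟩⟩
        · rcases List.mem_cons.mp hq with rfl | hq'
          · exact ⟨hx, Or.inl ⟨by omega, by omega⟩⟩
          · exact ⟨hx, Or.inr ⟨q, hq', hqx⟩⟩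
    · rw [if_neg h]
      obtain ⟨ihm, ihs⟩ := ih (p - radius) (p + radius) hpw' (by omega)
        (fun q hq => by have := hpq q hq; omega)
        (fun q hq => by have := hpq q hq; omega)
      constructor
      · intro x
        rw [List.mem_append, mem_pvEmit, ihm x]
        constructor
        · rintro (⟨hx, h1, h2⟩ | ⟨hx, (⟨h1, h2⟩ | ⟨q, hq, hqx⟩)⟩)
          · exact ⟨hx, Or.inl ⟨h1, h2⟩⟩
          · exact ⟨hx, Or.inr ⟨p, List.mem_cons_self, by omega⟩⟩
          · exact ⟨hx, Or.inr ⟨q, List.mem_cons_of_mem _ hq, hqx⟩⟩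
        · rintro ⟨hx, (⟨h1, h2⟩ | ⟨q, hq, hqx⟩)⟩
          · exact Or.inl ⟨hx, h1, h2⟩
          · rcases List.mem_cons.mp hq with rfl | hq'
            · exact Or.inr ⟨hx, Or.inl ⟨by omega, by omega⟩⟩
            · exact Or.inr ⟨hx, Or.inr ⟨q, hq', hqx⟩⟩
      · rw [List.pairwise_append]
        refine ⟨by simp only [pvEmit]; exact PySem.List.pairwise_lt_pyRange_one _ _, ihs, ?_⟩
        intro a ha b hb
        rw [mem_pvEmit] at ha
        have hb' := (ihm b).mp hb
        rcases hb' with ⟨hb0, (⟨hb1, _⟩ | ⟨q, hq, hqb⟩)⟩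
        · omega
        · have := hpq q hq; omega

theorem mem_inner_fold (l : List Int) (n x : Int) : ∀ (s : PySem.Set Int),
    (x ∈ l.foldl (fun s i => PySem.Set.add (PySem.Set.add s (n - i)) (n + i)) s ↔
      x ∈ s ∨ ∃ i ∈ l, x = n - i ∨ x = n + i) := by
  induction l with
  | nil => intro s; simp
  | cons i t ih =>
    intro s
    simp only [List.foldl_cons, ih, PySem.Set.mem_add, List.mem_cons]
    constructor
    · rintro (((h | h) | h) | ⟨j, hj, h⟩)
      · exact Or.inl h
      · exact Or.inr ⟨i, Or.inl rfl, Or.inl h⟩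
      · exact Or.inr ⟨i, Or.inl rfl, Or.inr h⟩
      · exact Or.inr ⟨j, Or.inr hj, h⟩
    · rintro (h | ⟨j, (rfl | hj), h⟩)
      · exact Or.inl (Or.inl (Or.inl h))
      · rcases h with h | h
        · exact Or.inl (Or.inl (Or.inr h))
        · exact Or.inl (Or.inr h)
      · exact Or.inr ⟨j, hj, h⟩

theorem nodup_inner_fold (l : List Int) (n : Int) : ∀ (s : PySem.Set Int), s.Nodup →
    (l.foldl (fun s i => PySem.Set.add (PySem.Set.add s (n - i)) (n + i)) s).Nodup := by
  induction l with
  | nil => intro s h; exact h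
  | cons i t ih =>
    intro s h
    simp only [List.foldl_cons]
    exact ih _ (PySem.Set.nodup_add _ _ (PySem.Set.nodup_add _ _ h))

theorem mem_outer_fold (radius : Int) (l : List Int) (x : Int) : ∀ (s : PySem.Set Int),
    (x ∈ l.foldl (fun s n => (PySem.List.pyRange 1 (radius + 1) 1).foldl
        (fun s i => PySem.Set.add (PySem.Set.add s (n - i)) (n + i)) s) s ↔
      x ∈ s ∨ ∃ n ∈ l, ∃ i ∈ PySem.List.pyRange 1 (radius + 1) 1, x = n - i ∨ x = n + i) := by
  induction l with
  | nil => intro s; simp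
  | cons n t ih =>
    intro s
    simp only [List.foldl_cons, ih, mem_inner_fold, List.mem_cons]
    constructor
    · rintro ((h | ⟨i, hi, h⟩) | ⟨m, hm, hrest⟩)
      · exact Or.inl h
      · exact Or.inr ⟨n, Or.inl rfl, i, hi, h⟩
      · exact Or.inr ⟨m, Or.inr hm, hrest⟩
    · rintro (h | ⟨m, (rfl | hm), hrest⟩)
      · exact Or.inl (Or.inl h)
      · exact Or.inl (Or.inr hrest)
      · exact Or.inr ⟨m, hm, hrest⟩

theorem nodup_outer_fold (radius : Int) (l : List Int) : ∀ (s : PySem.Set Int), s.Nodup →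
    (l.foldl (fun s n => (PySem.List.pyRange 1 (radius + 1) 1).foldl
        (fun s i => PySem.Set.add (PySem.Set.add s (n - i)) (n + i)) s) s).Nodup := by
  induction l with
  | nil => intro s h; exact h
  | cons n t ih =>
    intro s h
    simp only [List.foldl_cons]
    exact ih _ (nodup_inner_fold _ _ _ h)

theorem mem_filterA (page_nums : List Int) (radius : Int) (hr : 0 < radius) (x : Int) :
    x ∈ ((PySem.Set.ofList page_nums).foldl (fun s n =>
        (PySem.List.pyRange 1 (radius + 1) 1).foldl (fun s i =>
          PySem.Set.add (PySem.Set.add s (n - i)) (n + i)) s)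
        (PySem.Set.ofList page_nums)).filter (fun x => decide (0 ≤ x)) ↔
      0 ≤ x ∧ ∃ n ∈ page_nums, n - radius ≤ x ∧ x ≤ n + radius := by
  rw [List.mem_filter, mem_outer_fold]
  simp only [PySem.Set.mem_ofList, PySem.List.mem_pyRange_one, decide_eq_true_eq]
  constructor
  · rintro ⟨(hx | ⟨n, hn, i, ⟨hi1, hi2⟩, (rfl | rfl)⟩), h0⟩
    · exact ⟨h0, x, hx, by omega⟩
    · exact ⟨h0, n, hn, by omega⟩
    · exact ⟨h0, n, hn, by omega⟩
  · rintro ⟨h0, n, hn, h1, h2⟩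
    refine ⟨?_, h0⟩
    rcases lt_trichotomy x n with h | rfl | h
    · exact Or.inr ⟨n, hn, n - x, ⟨by omega, by omega⟩, Or.inl (by omega)⟩
    · exact Or.inl hn
    · exact Or.inr ⟨n, hn, x - n, ⟨by omega, by omega⟩, Or.inr (by omega)⟩

-- ===== VERDICT (by name: the statement is the Claim_ definition above) =====
theorem expand_neighbors_py_spec : Claim_equal_expand_neighbors_py := by
  intro page_nums radius _
  unfold Spec_expand_neighbors_py
  by_cases hr : radius ≤ 0
  · simp only [expand_neighbors_py, expand_neighbors_py_alt, if_pos hr]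
  · have hr' : 0 < radius := by omega
    simp only [expand_neighbors_py, expand_neighbors_py_alt, if_neg hr]
    rcases hu : PySem.List.sorted (PySem.Set.ofList page_nums) (fun x => x) false with _ | ⟨q, rest⟩
    · have hpages : page_nums = [] := by
        apply List.eq_nil_iff_forall_not_mem.mpr
        intro x hx
        have hx2 : x ∈ PySem.List.sorted (PySem.Set.ofList page_nums) (fun x => x) false := by
          rw [PySem.List.mem_sorted, PySem.Set.mem_ofList]; exact hx
        rw [hu] at hx2
        simp at hx2
      subst hpages
      rfl
    · have hupw : (q :: rest).Pairwise (· < ·) := by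
        rw [← hu]; exact PySem.List.sorted_ofList_pairwise_lt page_nums
      have humem : ∀ p : Int, p ∈ q :: rest ↔ p ∈ page_nums := by
        intro p
        rw [← hu, PySem.List.mem_sorted, PySem.Set.mem_ofList]
      have hpq : ∀ p ∈ rest, q < p := (List.pairwise_cons.mp hupw).1
      obtain ⟨memB, pwB⟩ := pvF_spec radius (le_of_lt hr') rest (q - radius) (q + radius)
        (List.pairwise_cons.mp hupw).2 (by omega)
        (fun p hp => by have := hpq p hp; omega)
        (fun p hp => by have := hpq p hp; omega)
      rw [List.foldl_cons]
      have hstep : pvStep radius ([], none) q = ([], some (q - radius, q + radius)) := rfl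
      rw [hstep, pvFoldl_eq_pvF, List.nil_append]
      apply PySem.List.sorted_eq_of_perm_of_pairwise_lt
      · rw [List.perm_ext_iff_of_nodup (pwB.imp fun h => ne_of_lt h)
          (List.Nodup.filter _ (nodup_outer_fold radius _ _ (PySem.Set.nodup_ofList _)))]
        intro x
        rw [memB x, mem_filterA page_nums radius hr' x]
        constructor
        · rintro ⟨h0, (⟨h1, h2⟩ | ⟨p, hp, h⟩)⟩
          · exact ⟨h0, q, (humem q).mp List.mem_cons_self, by omega⟩
          · exact ⟨h0, p, (humem p).mp (List.mem_cons_of_mem _ hp), h⟩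
        · rintro ⟨h0, p, hp, h1, h2⟩
          rcases List.mem_cons.mp ((humem p).mpr hp) with rfl | hp'
          · exact ⟨h0, Or.inl ⟨by omega, by omega⟩⟩
          · exact ⟨h0, Or.inr ⟨p, hp', h1, h2⟩⟩
      · exact pwB
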